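-- pv_equiv track=rewrite | github.com/Wpawlina/AGH-ITCS-Course | cwiczenia/while arkusz1/fibYear2.py | zad
-- ===== SOURCE A (Python) =====
-- def zad(year):
--     a=1
--     b=1
--     mins=year+1
--     ap=0
--     bp=0
--     for a in range(1,year):
--         for b in range(a,year):
--             if sprawdzCiag(a,b,year):
--                 if mins>a+b:
--                     mins=a+b
--                     ap=a
--                     bp=b
--     return ap,bp
--
-- def sprawdzCiag(a,b,year):
--     while b<year:
--         a,b=b,a+b
--     if b==year:
--         return True
--     else:
--         return False
-- ===== SOURCE B (Python) =====
-- def zad(year):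
--     # For each b, a starting pair (a, b) reaches `year` iff
--     # F(n)*a + F(n+1)*b == year for some n >= 1 (F = Fibonacci, F(1)=F(2)=1).
--     # Enumerate consecutive Fibonacci coefficient pairs (p, q) per b and solve for a.
--     best = None  # (a + b, a, b), minimal lexicographically
--     for b in range(1, year):
--         p, q = 1, 1
--         while p + q * b <= year:
--             r = year - q * b
--             if r % p == 0:
--                 a = r // p
--                 if a <= b and (best is None or (a + b, a) < (best[0], best[1])):
--                     best = (a + b, a, b)
--             p, q = q, p + q
--     if best is None:
--         return (0, 0)
--     return (best[1], best[2])
-- ===== Notes on version B (the rewrite author's own statement) =====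
-- stated objective: faster
-- what changed: Instead of simulating the Fibonacci-like sequence for every pair (a,b) (O(year^2) pairs, O(log year) simulation each), B loops over b only and, per b, walks the O(log year) consecutive Fibonacci coefficient pairs (p,q), solving p*a+q*b=year for a by divisibility, keeping the minimum by (a+b,a).
import Mathlib
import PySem

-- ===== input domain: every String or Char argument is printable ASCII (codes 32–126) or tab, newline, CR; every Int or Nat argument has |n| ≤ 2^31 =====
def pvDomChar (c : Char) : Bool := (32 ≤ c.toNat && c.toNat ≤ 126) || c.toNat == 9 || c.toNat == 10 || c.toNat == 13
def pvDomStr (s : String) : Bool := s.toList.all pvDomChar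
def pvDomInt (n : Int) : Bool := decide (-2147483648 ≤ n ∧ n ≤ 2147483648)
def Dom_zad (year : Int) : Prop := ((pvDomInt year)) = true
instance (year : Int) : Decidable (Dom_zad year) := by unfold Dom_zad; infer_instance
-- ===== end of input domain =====

-- B replaces A's per-pair sequence simulation by a per-b walk over consecutive
-- Fibonacci coefficient pairs, solving p*a + q*b = year for a by divisibility (faster).

-- ===== PORT A =====
-- while b < year: a, b = b, a + b  — fuel (year - b).toNat + 1 suffices since zad
-- only calls with 1 ≤ a ≤ b, where b grows by at least 1 per iteration (exact there).
def sprCore (year : Int) : Nat → Int → Int → Bool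
  | 0, _, b => b == year
  | fuel+1, a, b => if b < year then sprCore year fuel b (a + b) else b == year

def sprawdzCiag (a b year : Int) : Bool := sprCore year ((year - b).toNat + 1) a b

def zad (year : Int) : List Int :=
  let st := (PySem.List.pyRange 1 year 1).foldl (fun st a =>
      (PySem.List.pyRange a year 1).foldl (fun st b =>
        if sprawdzCiag a b year then
          if st.1 > a + b then (a + b, a, b) else st
        else st) st) (year + 1, 0, 0)
  [st.2.1, st.2.2]

-- ===== PORT B =====
-- inner while loop of Source B; fuel (year - (1 + b)).toNat + 1 is enough at the call site
-- since p + q*b starts at 1 + b and strictly increases each iteration.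
def fibLoop (year b : Int) : Nat → Int → Int → Option (Int × Int × Int) → Option (Int × Int × Int)
  | 0, _, _, best => best
  | fuel+1, p, q, best =>
    if p + q * b ≤ year then
      fibLoop year b fuel q (p + q)
        (if PySem.Int.mod (year - q * b) p = 0 then
           let a := PySem.Int.floordiv (year - q * b) p
           if a ≤ b then
             match best with
             | none => some (a + b, a, b)
             | some (s, a0, b0) =>
               if a + b < s ∨ (a + b = s ∧ a < a0) then some (a + b, a, b) else some (s, a0, b0)
           else best
         else best)
    else best

def zad_alt (year : Int) : List Int :=
  let best := (PySem.List.pyRange 1 year 1).foldl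
    (fun best b => fibLoop year b ((year - (1 + b)).toNat + 1) 1 1 best) none
  match best with
  | none => [0, 0]
  | some (_, a, b) => [a, b]

-- ===== PRECONDITION & SPEC =====
def Spec_zad (year : Int) (out : List Int) : Prop := out = zad_alt year
instance (year : Int) (out : List Int) : Decidable (Spec_zad year out) := by unfold Spec_zad; infer_instance

-- ===== CLAIM (what is proved, stated in full; the proofs are below) =====
def Claim_equal_zad : Prop := ∀ (year : Int), Dom_zad year → Spec_zad year (zad year)

-- ===== LEMMAS AND PROOFS =====

def Fi (n : Nat) : Int := (Nat.fib n : Int)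

lemma Fi_pos (n : Nat) : 1 ≤ Fi (n+1) := by
  have := Nat.fib_pos.mpr (Nat.succ_pos n)
  unfold Fi; exact_mod_cast this

lemma Fi_mono {m n : Nat} (h : m ≤ n) : Fi m ≤ Fi n := by
  unfold Fi; exact_mod_cast Nat.fib_mono h

lemma Fi_rec (n : Nat) : Fi (n+2) = Fi n + Fi (n+1) := by
  unfold Fi; exact_mod_cast Nat.fib_add_two

-- the starting pair (a,b)'s sequence hits `year` at some checked term
def Hit (year a b : Int) : Prop := ∃ n : Nat, Fi (n+1) * a + Fi (n+2) * b = year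

def ValidP (year : Int) (pr : Int × Int) : Prop :=
  1 ≤ pr.1 ∧ pr.1 ≤ pr.2 ∧ pr.2 < year ∧ Hit year pr.1 pr.2

lemma ValidP_sum_le {year : Int} {pr : Int × Int} (h : ValidP year pr) : pr.1 + pr.2 ≤ year := by
  obtain ⟨h1, h2, h3, n, hn⟩ := h
  have hp := Fi_pos n
  have hq := Fi_pos (n+1)
  have e1 : 1 * pr.1 ≤ Fi (n+1) * pr.1 := mul_le_mul_of_nonneg_right hp (by linarith)
  have e2 : 1 * pr.2 ≤ Fi (n+2) * pr.2 := mul_le_mul_of_nonneg_right hq (by linarith)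
  linarith [hn]

-- the candidate that Source B's inner loop inspects at Fibonacci index n for this b
def CandP (year b : Int) (n : Nat) (pr : Int × Int) : Prop :=
  pr.2 = b ∧ Fi (n+1) * pr.1 + Fi (n+2) * pr.2 = year ∧ 1 ≤ pr.1 ∧ pr.1 ≤ pr.2

-- invariant of A's fold: state = lexicographic minimum by (sum, a) over valid seen pairs
def InvA (year : Int) (P : Int × Int → Prop) (st : Int × Int × Int) : Prop :=
  (st = (year + 1, 0, 0) ∧ ∀ pr, P pr → ValidP year pr → False) ∨
  (∃ a b, st = (a + b, a, b) ∧ P (a, b) ∧ ValidP year (a, b) ∧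
     ∀ a' b', P (a', b') → ValidP year (a', b') → a + b < a' + b' ∨ (a + b = a' + b' ∧ a ≤ a'))

-- invariant of B's fold: best = lexicographic minimum by (sum, a) over seen candidates
def InvB (_year : Int) (P : Int × Int → Prop) (best : Option (Int × Int × Int)) : Prop :=
  (best = none ∧ ∀ pr, P pr → False) ∨
  (∃ a b, best = some (a + b, a, b) ∧ P (a, b) ∧
     ∀ a' b', P (a', b') → a + b < a' + b' ∨ (a + b = a' + b' ∧ a ≤ a'))

lemma InvA_congr {year : Int} {P Q : Int × Int → Prop} {st : Int × Int × Int}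
    (hiff : ∀ pr, ValidP year pr → (P pr ↔ Q pr)) (h : InvA year P st) : InvA year Q st := by
  rcases h with ⟨h1, h2⟩ | ⟨a, b, hst, hP, hV, hmin⟩
  · exact Or.inl ⟨h1, fun pr hQ hV => h2 pr ((hiff pr hV).mpr hQ) hV⟩
  · exact Or.inr ⟨a, b, hst, (hiff _ hV).mp hP, hV,
      fun a' b' hQ hV' => hmin a' b' ((hiff _ hV').mpr hQ) hV'⟩

lemma InvB_congr {year : Int} {P Q : Int × Int → Prop} {best : Option (Int × Int × Int)}
    (hiff : ∀ pr, P pr ↔ Q pr) (h : InvB year P best) : InvB year Q best := by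
  rcases h with ⟨h1, h2⟩ | ⟨a, b, hb, hP, hmin⟩
  · exact Or.inl ⟨h1, fun pr hQ => h2 pr ((hiff pr).mpr hQ)⟩
  · exact Or.inr ⟨a, b, hb, (hiff _).mp hP, fun a' b' hQ => hmin a' b' ((hiff _).mpr hQ)⟩

-- characterization of A's sequence check
lemma sprCore_stop (year : Int) (fuel : Nat) (a b : Int) (h : ¬ b < year) :
    sprCore year fuel a b = (b == year) := by
  cases fuel with
  | zero => rfl
  | succ f => simp [sprCore, h]

lemma sprCore_iff (year : Int) : ∀ (fuel : Nat) (a b : Int), 1 ≤ a → a ≤ b → b < year →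
    (year - b).toNat < fuel → (sprCore year fuel a b = true ↔ Hit year a b) := by
  intro fuel
  induction fuel with
  | zero => intro a b _ _ _ hf; omega
  | succ f ih =>
    intro a b ha hab hb hf
    simp only [sprCore, if_pos hb]
    by_cases hsum : a + b < year
    · rw [ih b (a + b) (by omega) (by omega) hsum (by omega)]
      constructor
      · rintro ⟨n, hn⟩
        refine ⟨n + 1, ?_⟩
        rw [Fi_rec (n+1)]
        linear_combination hn
      · rintro ⟨n, hn⟩
        cases n with
        | zero =>
          exfalso
          have h1 : Fi 1 = 1 := by unfold Fi; norm_num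
          have h2 : Fi 2 = 1 := by unfold Fi; norm_num
          rw [h1, h2] at hn; omega
        | succ m =>
          refine ⟨m, ?_⟩
          rw [Fi_rec (m+1)] at hn
          linear_combination hn
    · rw [sprCore_stop year f b (a + b) hsum]
      have h1 : Fi 1 = 1 := by unfold Fi; norm_num
      have h2 : Fi 2 = 1 := by unfold Fi; norm_num
      constructor
      · intro h
        have : a + b = year := by simpa using h
        exact ⟨0, by rw [h1, h2]; linarith⟩
      · rintro ⟨n, hn⟩
        cases n with
        | zero => rw [h1, h2] at hn; simp; omega
        | succ m =>
          exfalso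
          have hp : 1 ≤ Fi (m+2) := Fi_pos (m+1)
          have hq : 2 ≤ Fi (m+3) := by
            have : (2:Int) = (Nat.fib 3 : Int) := by norm_num
            rw [this]; exact Fi_mono (by omega)
          have e1 : 1 * a ≤ Fi (m+2) * a := mul_le_mul_of_nonneg_right hp (by linarith)
          have e2 : 2 * b ≤ Fi (m+3) * b := mul_le_mul_of_nonneg_right hq (by linarith)
          linarith [hn]

lemma sprawdz_iff {year a b : Int} (ha : 1 ≤ a) (hab : a ≤ b) (hb : b < year) :
    (sprawdzCiag a b year = true ↔ Hit year a b) := by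
  unfold sprawdzCiag
  exact sprCore_iff year _ a b ha hab hb (by omega)

-- ---- A side ----

lemma stepA (year a b : Int) (ha : 1 ≤ a) (hab : a ≤ b) (hb : b < year)
    (P : Int × Int → Prop) (st : Int × Int × Int) (hInv : InvA year P st)
    (hord : ∀ pr, P pr → ValidP year pr → pr.1 ≤ a) :
    InvA year (fun pr => P pr ∨ pr = (a, b))
      (if sprawdzCiag a b year then (if st.1 > a + b then (a + b, a, b) else st) else st) := by
  by_cases hc : sprawdzCiag a b year = true
  · have hhit : Hit year a b := (sprawdz_iff ha hab hb).mp hc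
    have hV : ValidP year (a, b) := ⟨ha, hab, hb, hhit⟩
    have hsum : a + b ≤ year := ValidP_sum_le hV
    rw [if_pos hc]
    rcases hInv with ⟨h1, h2⟩ | ⟨a0, b0, hst, hP0, hV0, hmin⟩
    · rw [h1]
      rw [if_pos (show year + 1 > a + b by omega)]
      refine Or.inr ⟨a, b, rfl, Or.inr rfl, hV, ?_⟩
      rintro a' b' (hP' | he) hV'
      · exact absurd hV' (h2 _ hP')
      · injection he with e1 e2; omega
    · rw [hst]
      by_cases hlt : a0 + b0 > a + b
      · rw [if_pos hlt]
        simp only [gt_iff_lt] at hlt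
        refine Or.inr ⟨a, b, rfl, Or.inr rfl, hV, ?_⟩
        rintro a' b' (hP' | he) hV'
        · rcases hmin a' b' hP' hV' with h | ⟨h, _⟩ <;> left <;> omega
        · injection he with e1 e2; omega
      · rw [if_neg hlt]
        simp only [gt_iff_lt, not_lt] at hlt
        refine Or.inr ⟨a0, b0, rfl, Or.inl hP0, hV0, ?_⟩
        rintro a' b' (hP' | he) hV'
        · exact hmin a' b' hP' hV'
        · injection he with e1 e2; subst e1; subst e2
          rcases lt_or_eq_of_le hlt with h | h
          · left; omega
          · right; exact ⟨h, hord _ hP0 hV0⟩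
  · rw [if_neg hc]
    refine InvA_congr ?_ hInv
    intro pr hV
    constructor
    · exact Or.inl
    · rintro (h | rfl)
      · exact h
      · exact absurd ((sprawdz_iff ha hab hb).mpr hV.2.2.2) hc

lemma foldA_inner (year a : Int) (ha : 1 ≤ a) :
    ∀ (bl : List Int) (P : Int × Int → Prop) (st : Int × Int × Int),
    InvA year P st →
    (∀ b ∈ bl, a ≤ b ∧ b < year) →
    (∀ pr, P pr → ValidP year pr → pr.1 ≤ a) →
    InvA year (fun pr => P pr ∨ (pr.1 = a ∧ pr.2 ∈ bl))
      (bl.foldl (fun st b =>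
        if sprawdzCiag a b year then
          if st.1 > a + b then (a + b, a, b) else st
        else st) st) := by
  intro bl
  induction bl with
  | nil =>
    intro P st hInv _ _
    exact InvA_congr (by simp) hInv
  | cons b bl ih =>
    intro P st hInv hbl hord
    obtain ⟨hab, hb⟩ := hbl b (List.mem_cons_self)
    have h1 := stepA year a b ha hab hb P st hInv hord
    have h2 := ih (fun pr => P pr ∨ pr = (a, b)) _ h1
      (fun x hx => hbl x (List.mem_cons_of_mem _ hx))
      (by rintro pr (hP | rfl) hV
          · exact hord pr hP hV
          · exact le_refl a)
    refine InvA_congr ?_ h2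
    rintro ⟨x, y⟩ _
    simp only [List.mem_cons]
    constructor
    · rintro ((hP | he) | ⟨rfl, hy⟩)
      · exact Or.inl hP
      · injection he with e1 e2; exact Or.inr ⟨e1, Or.inl e2⟩
      · exact Or.inr ⟨rfl, Or.inr hy⟩
    · rintro (hP | ⟨rfl, (rfl | hy)⟩)
      · exact Or.inl (Or.inl hP)
      · exact Or.inl (Or.inr rfl)
      · exact Or.inr ⟨rfl, hy⟩

lemma foldA_outer (year : Int) :
    ∀ (al : List Int) (P : Int × Int → Prop) (st : Int × Int × Int),
    InvA year P st →
    (∀ x ∈ al, 1 ≤ x) →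
    List.Pairwise (· ≤ ·) al →
    (∀ pr, P pr → ValidP year pr → ∀ x ∈ al, pr.1 ≤ x) →
    InvA year (fun pr => P pr ∨ (pr.1 ∈ al ∧ pr.1 ≤ pr.2 ∧ pr.2 < year))
      (al.foldl (fun st a =>
        (PySem.List.pyRange a year 1).foldl (fun st b =>
          if sprawdzCiag a b year then
            if st.1 > a + b then (a + b, a, b) else st
          else st) st) st) := by
  intro al
  induction al with
  | nil =>
    intro P st hInv _ _ _
    exact InvA_congr (by simp) hInv
  | cons a al ih =>
    intro P st hInv h1 hpw hord
    have ha : 1 ≤ a := h1 a List.mem_cons_self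
    have hstep := foldA_inner year a ha (PySem.List.pyRange a year 1) P st hInv
      (fun b hb => (PySem.List.mem_pyRange_one.mp hb))
      (fun pr hP hV => hord pr hP hV a List.mem_cons_self)
    rw [List.pairwise_cons] at hpw
    have hres := ih _ _ hstep (fun x hx => h1 x (List.mem_cons_of_mem _ hx)) hpw.2
      (by rintro pr (hP | ⟨he, _⟩) hV x hx
          · exact hord pr hP hV x (List.mem_cons_of_mem _ hx)
          · rw [he]; exact hpw.1 x hx)
    refine InvA_congr ?_ hres
    rintro ⟨x, y⟩ hV
    have hx1 := hV.1
    have hxy := hV.2.1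
    have hy := hV.2.2.1
    simp only [List.mem_cons, PySem.List.mem_pyRange_one]
    constructor
    · rintro ((hP | ⟨rfl, _, _⟩) | ⟨hx, h⟩)
      · exact Or.inl hP
      · exact Or.inr ⟨Or.inl rfl, hxy, hy⟩
      · exact Or.inr ⟨Or.inr hx, h⟩
    · rintro (hP | ⟨(rfl | hx), h⟩)
      · exact Or.inl (Or.inl hP)
      · exact Or.inl (Or.inr ⟨rfl, hxy, hy⟩)
      · exact Or.inr ⟨hx, h⟩

lemma zad_invariant (year : Int) :
    InvA year (fun _ => True)
      ((PySem.List.pyRange 1 year 1).foldl (fun st a =>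
        (PySem.List.pyRange a year 1).foldl (fun st b =>
          if sprawdzCiag a b year then
            if st.1 > a + b then (a + b, a, b) else st
          else st) st) (year + 1, 0, 0)) := by
  have h0 : InvA year (fun _ => False) (year + 1, 0, 0) :=
    Or.inl ⟨rfl, fun pr h => h.elim⟩
  have h := foldA_outer year (PySem.List.pyRange 1 year 1) _ _ h0
    (fun x hx => (PySem.List.mem_pyRange_one.mp hx).1)
    ((PySem.List.pairwise_lt_pyRange_one 1 year).imp (fun h => le_of_lt h))
    (fun pr h => h.elim)
  refine InvA_congr ?_ h
  rintro ⟨x, y⟩ hV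
  simp only [PySem.List.mem_pyRange_one, false_or, iff_true]
  exact ⟨⟨hV.1, by have := hV.2.1; have := hV.2.2.1; omega⟩, hV.2.1, hV.2.2.1⟩

-- ---- B side ----

lemma InvB_update (year : Int) (P : Int × Int → Prop) (best : Option (Int × Int × Int))
    (a b : Int) :
    InvB year P best →
    InvB year (fun pr => P pr ∨ pr = (a, b))
      (match best with
       | none => some (a + b, a, b)
       | some (s, a0, b0) =>
         if a + b < s ∨ (a + b = s ∧ a < a0) then some (a + b, a, b) else some (s, a0, b0)) := by
  rintro hInv
  rcases hInv with ⟨hnone, hemp⟩ | ⟨a0, b0, hsome, hP0, hmin⟩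
  · subst hnone
    refine Or.inr ⟨a, b, rfl, Or.inr rfl, ?_⟩
    rintro a' b' (hP' | he)
    · exact absurd hP' (hemp _)
    · injection he with e1 e2; omega
  · subst hsome
    by_cases hlt : a + b < a0 + b0 ∨ (a + b = a0 + b0 ∧ a < a0)
    · refine Or.inr ⟨a, b, ?_, Or.inr rfl, ?_⟩
      · show (if a + b < a0 + b0 ∨ (a + b = a0 + b0 ∧ a < a0) then some (a + b, a, b)
              else some (a0 + b0, a0, b0)) = some (a + b, a, b)
        rw [if_pos hlt]
      · rintro a' b' (hP' | he)
        · rcases hmin a' b' hP' with h | ⟨h, h2⟩ <;> rcases hlt with h' | ⟨h', h2'⟩ <;> omega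
        · injection he with e1 e2; omega
    · refine Or.inr ⟨a0, b0, ?_, Or.inl hP0, ?_⟩
      · show (if a + b < a0 + b0 ∨ (a + b = a0 + b0 ∧ a < a0) then some (a + b, a, b)
              else some (a0 + b0, a0, b0)) = some (a0 + b0, a0, b0)
        rw [if_neg hlt]
      · rintro a' b' (hP' | he)
        · exact hmin a' b' hP'
        · injection he with e1 e2; subst e1; subst e2
          omega

lemma stepB (year b : Int) (hb : 1 ≤ b) (n : Nat)
    (hguard : Fi (n+1) + Fi (n+2) * b ≤ year)
    (P : Int × Int → Prop) (best : Option (Int × Int × Int)) :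
    InvB year P best →
    InvB year (fun pr => P pr ∨ CandP year b n pr)
      (if PySem.Int.mod (year - Fi (n+2) * b) (Fi (n+1)) = 0 then
         let a := PySem.Int.floordiv (year - Fi (n+2) * b) (Fi (n+1))
         if a ≤ b then
           match best with
           | none => some (a + b, a, b)
           | some (s, a0, b0) =>
             if a + b < s ∨ (a + b = s ∧ a < a0) then some (a + b, a, b) else some (s, a0, b0)
         else best
       else best) := by
  intro hInv
  have hp : 1 ≤ Fi (n+1) := Fi_pos n
  set p := Fi (n+1) with hpdef
  set q := Fi (n+2) with hqdef
  set r := year - q * b with hrdef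
  by_cases hdvd : PySem.Int.mod r p = 0
  · rw [if_pos hdvd]
    have hdvd' : p ∣ r := (PySem.Int.mod_eq_zero_iff_dvd r p).mp hdvd
    have hfd : PySem.Int.floordiv r p = r / p := PySem.Int.floordiv_eq_ediv_of_pos (by omega)
    have hpa0 : p * PySem.Int.floordiv r p = r := by
      rw [hfd]; exact Int.mul_ediv_cancel' hdvd'
    set a := PySem.Int.floordiv r p with hadef
    have hpa : p * a = r := hpa0
    have hr : p ≤ r := by omega
    have ha1 : 1 ≤ a := by
      by_contra h
      have ha0 : a ≤ 0 := by omega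
      have : p * a ≤ 0 := mul_nonpos_of_nonneg_of_nonpos (by linarith) ha0
      linarith
    have hcand : ∀ pr, CandP year b n pr ↔ (a ≤ b ∧ pr = (a, b)) := by
      rintro ⟨x, y⟩
      constructor
      · rintro ⟨hy, heq, hx1, hxy⟩
        simp only at hy heq hx1 hxy
        subst hy
        rw [← hpdef, ← hqdef] at heq
        have hx : p * x = r := by linarith [heq]
        have : a = x := mul_left_cancel₀ (by omega : p ≠ 0) (by rw [hpa, hx])
        subst this
        exact ⟨hxy, rfl⟩
      · rintro ⟨hab, he⟩
        injection he with e1 e2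
        subst e1; subst e2
        refine ⟨rfl, ?_, ha1, hab⟩
        simp only [← hpdef, ← hqdef]
        linarith [hpa]
    by_cases hab : a ≤ b
    · rw [if_pos hab]
      refine InvB_congr ?_ (InvB_update year P best a b hInv)
      intro pr
      rw [hcand pr]
      constructor
      · rintro (h | h)
        · exact Or.inl h
        · exact Or.inr ⟨hab, h⟩
      · rintro (h | ⟨_, h⟩)
        · exact Or.inl h
        · exact Or.inr h
    · rw [if_neg hab]
      refine InvB_congr ?_ hInv
      intro pr
      constructor
      · exact Or.inl
      · rintro (h | hc)
        · exact h
        · exact absurd ((hcand pr).mp hc).1 hab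
  · rw [if_neg hdvd]
    refine InvB_congr ?_ hInv
    intro pr
    constructor
    · exact Or.inl
    · rintro (h | hc)
      · exact h
      · exfalso
        obtain ⟨hy, heq, hx1, hxy⟩ := hc
        apply hdvd
        rw [PySem.Int.mod_eq_zero_iff_dvd]
        refine ⟨pr.1, ?_⟩
        rw [hrdef, hpdef, hqdef]
        rw [hy] at heq
        omega

lemma candGe_empty (year b : Int) (n : Nat) (hgt : year < Fi (n+1) + Fi (n+2) * b) :
    ∀ pr : Int × Int, (∃ m, n ≤ m ∧ CandP year b m pr) → False := by
  rintro pr ⟨m, hm, hy, heq, hx1, hxy⟩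
  have h1 : Fi (n+1) ≤ Fi (m+1) := Fi_mono (by omega)
  have h2 : Fi (n+2) ≤ Fi (m+2) := Fi_mono (by omega)
  have hb1 : 1 ≤ b := by omega
  rw [hy] at heq
  have e1 : Fi (m+1) * 1 ≤ Fi (m+1) * pr.1 :=
    mul_le_mul_of_nonneg_left hx1 (by linarith [Fi_pos m])
  have e2 : Fi (n+2) * b ≤ Fi (m+2) * b :=
    mul_le_mul_of_nonneg_right h2 (by linarith)
  linarith [heq, e1, e2]

lemma fibLoop_inv (year b : Int) (hb : 1 ≤ b) :
    ∀ (fuel : Nat) (n : Nat) (P : Int × Int → Prop) (best : Option (Int × Int × Int)),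
    (year + 1 - (Fi (n+1) + Fi (n+2) * b)).toNat ≤ fuel →
    InvB year P best →
    InvB year (fun pr => P pr ∨ ∃ m, n ≤ m ∧ CandP year b m pr)
      (fibLoop year b fuel (Fi (n+1)) (Fi (n+2)) best) := by
  intro fuel
  induction fuel with
  | zero =>
    intro n P best hf hInv
    have hgt : year < Fi (n+1) + Fi (n+2) * b := by omega
    refine InvB_congr ?_ hInv
    intro pr
    constructor
    · exact Or.inl
    · rintro (hP | hc)
      · exact hP
      · exact absurd hc (candGe_empty year b n hgt pr)
  | succ f ih =>
    intro n P best hf hInv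
    have hp : 1 ≤ Fi (n+1) := Fi_pos n
    have hq : 1 ≤ Fi (n+2) := Fi_pos (n+1)
    have hpq : Fi (n+1) ≤ Fi (n+2) := Fi_mono (by omega)
    by_cases hguard : Fi (n+1) + Fi (n+2) * b ≤ year
    · have hstep := stepB year b hb n hguard P best hInv
      have hnext : Fi (n+2) + Fi (n+3) * b ≥ Fi (n+1) + Fi (n+2) * b + 1 := by
        have h3 : Fi (n+3) * b = Fi (n+1) * b + Fi (n+2) * b := by
          rw [Fi_rec (n+1)]; ring
        have hmul : Fi (n+1) * 1 ≤ Fi (n+1) * b := mul_le_mul_of_nonneg_left hb (by linarith)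
        linarith
      have e1 : Fi (n+1+1) = Fi (n+2) := rfl
      have e2 : Fi (n+1+2) = Fi (n+1) + Fi (n+2) := by rw [Fi_rec (n+1), e1]
      have hrec := ih (n+1) (fun pr => P pr ∨ CandP year b n pr) _
        (by have e1' : Fi (n+1+1) = Fi (n+2) := rfl
            have e2' : Fi (n+1+2) = Fi (n+3) := rfl
            rw [e1', e2']
            omega) hstep
      rw [e1, e2] at hrec
      simp only [fibLoop, if_pos hguard]
      refine InvB_congr ?_ hrec
      intro pr
      constructor
      · rintro ((hP | hc) | ⟨m, hm, hc⟩)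
        · exact Or.inl hP
        · exact Or.inr ⟨n, le_refl n, hc⟩
        · exact Or.inr ⟨m, by omega, hc⟩
      · rintro (hP | ⟨m, hm, hc⟩)
        · exact Or.inl (Or.inl hP)
        · rcases Nat.eq_or_lt_of_le hm with rfl | hlt
          · exact Or.inl (Or.inr hc)
          · exact Or.inr ⟨m, by omega, hc⟩
    · simp only [fibLoop, if_neg hguard]
      refine InvB_congr ?_ hInv
      intro pr
      constructor
      · exact Or.inl
      · rintro (hP | ⟨m, hm, hy, heq, hx1, hxy⟩)
        · exact hP
        · exfalso
          apply hguard
          have h1 : Fi (n+1) ≤ Fi (m+1) := Fi_mono (by omega)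
          have h2 : Fi (n+2) ≤ Fi (m+2) := Fi_mono (by omega)
          have hpm : 1 ≤ Fi (m+1) := Fi_pos m
          rw [hy] at heq
          have e1 : Fi (m+1) * 1 ≤ Fi (m+1) * pr.1 := mul_le_mul_of_nonneg_left hx1 (by linarith)
          have e2 : Fi (n+2) * b ≤ Fi (m+2) * b := mul_le_mul_of_nonneg_right h2 (by linarith)
          linarith [heq, e1, e2, Fi_mono (show n+1 ≤ m+1 by omega)]

lemma foldB (year : Int) :
    ∀ (bl : List Int) (P : Int × Int → Prop) (best : Option (Int × Int × Int)),
    InvB year P best →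
    (∀ b ∈ bl, 1 ≤ b) →
    InvB year (fun pr => P pr ∨ (pr.2 ∈ bl ∧ ∃ m, CandP year pr.2 m pr))
      (bl.foldl (fun best b => fibLoop year b ((year - (1 + b)).toNat + 1) 1 1 best) best) := by
  intro bl
  induction bl with
  | nil =>
    intro P best hInv _
    exact InvB_congr (by simp) hInv
  | cons b bl ih =>
    intro P best hInv hbl
    have hb : 1 ≤ b := hbl b List.mem_cons_self
    have h1 : (1 : Int) = Fi 1 := by unfold Fi; norm_num
    have h2 : (1 : Int) = Fi 2 := by unfold Fi; norm_num
    have hstep := fibLoop_inv year b hb ((year - (1 + b)).toNat + 1) 0 P best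
      (by rw [← h1, ← h2]; omega) hInv
    rw [← h1, ← h2] at hstep
    have hres := ih _ _ hstep (fun x hx => hbl x (List.mem_cons_of_mem _ hx))
    refine InvB_congr ?_ hres
    rintro ⟨x, y⟩
    simp only [List.mem_cons]
    constructor
    · rintro ((hP | ⟨m, _, hc⟩) | ⟨hy, hm⟩)
      · exact Or.inl hP
      · have hy : y = b := hc.1
        subst hy
        exact Or.inr ⟨Or.inl rfl, m, hc⟩
      · exact Or.inr ⟨Or.inr hy, hm⟩
    · rintro (hP | ⟨(he | hy), m, hc⟩)
      · exact Or.inl (Or.inl hP)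
      · have hy : y = b := he
        subst hy
        exact Or.inl (Or.inr ⟨m, Nat.zero_le m, hc⟩)
      · exact Or.inr ⟨hy, m, hc⟩

lemma zad_alt_invariant (year : Int) :
    InvB year (fun pr => ValidP year pr)
      ((PySem.List.pyRange 1 year 1).foldl
        (fun best b => fibLoop year b ((year - (1 + b)).toNat + 1) 1 1 best) none) := by
  have h0 : InvB year (fun _ => False) none := Or.inl ⟨rfl, fun pr h => h.elim⟩
  have h := foldB year (PySem.List.pyRange 1 year 1) _ _ h0
    (fun x hx => (PySem.List.mem_pyRange_one.mp hx).1)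
  refine InvB_congr ?_ h
  rintro ⟨x, y⟩
  simp only [PySem.List.mem_pyRange_one, false_or]
  constructor
  · rintro ⟨⟨hy1, hy2⟩, m, hc⟩
    obtain ⟨_, heq, hx1, hxy⟩ := hc
    exact ⟨hx1, hxy, hy2, ⟨m, heq⟩⟩
  · rintro ⟨hx1, hxy, hy2, m, heq⟩
    exact ⟨⟨by omega, hy2⟩, m, rfl, heq, hx1, hxy⟩

-- ===== VERDICT (by name: the statement is the Claim_ definition above) =====
theorem zad_spec : Claim_equal_zad := by
  intro year _
  unfold Spec_zad
  simp only [zad, zad_alt]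
  have hA := zad_invariant year
  have hB := zad_alt_invariant year
  rcases hA with ⟨hstA, hnoA⟩ | ⟨a, b, hstA, _, hVA, hminA⟩ <;>
    rcases hB with ⟨hbB, hnoB⟩ | ⟨a', b', hbB, hPB, hminB⟩
  · rw [hstA, hbB]
  · exfalso; exact hnoA (a', b') trivial hPB
  · exfalso; exact hnoB (a, b) hVA
  · have h1 := hminA a' b' trivial hPB
    have h2 := hminB a b hVA
    have heq : a = a' ∧ b = b' := by
      rcases h1 with h | ⟨h, h'⟩ <;> rcases h2 with g | ⟨g, g'⟩ <;> constructor <;> omega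
    rw [hstA, hbB, heq.1, heq.2]
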